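-- pv_equiv track=rewrite | github.com/SebKrantz/blog | clean_unused_media.py | parse_srcset
-- ===== SOURCE A (Python) =====
-- def parse_srcset(value: str) -> list[str]:
--     out = []
--     for part in value.split(','):
--         part = part.strip()
--         if not part:
--             continue
--         url = part.split()[0]
--         if url:
--             out.append(url)
--     return out
-- ===== SOURCE B (Python) =====
-- def parse_srcset(value: str) -> list[str]:
--     # Single-pass character scanner: emits the first whitespace-delimited
--     # token of each comma-separated segment, instead of split/strip/split.
--     out = []
--     token = []
--     taken = False
--     for ch in value:
--         if ch == ',':
--             if token and not taken:
--                 out.append(''.join(token))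
--             token = []
--             taken = False
--         elif ch.isspace():
--             if token:
--                 if not taken:
--                     out.append(''.join(token))
--                     taken = True
--                 token = []
--         else:
--             token.append(ch)
--     if token and not taken:
--         out.append(''.join(token))
--     return out
-- ===== Notes on version B (the rewrite author's own statement) =====
-- stated objective: alternative
-- what changed: Replaces split-on-comma + strip + whitespace-split per segment with a single one-pass character state machine (current token, emitted-flag) over the string.
import Mathlib
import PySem

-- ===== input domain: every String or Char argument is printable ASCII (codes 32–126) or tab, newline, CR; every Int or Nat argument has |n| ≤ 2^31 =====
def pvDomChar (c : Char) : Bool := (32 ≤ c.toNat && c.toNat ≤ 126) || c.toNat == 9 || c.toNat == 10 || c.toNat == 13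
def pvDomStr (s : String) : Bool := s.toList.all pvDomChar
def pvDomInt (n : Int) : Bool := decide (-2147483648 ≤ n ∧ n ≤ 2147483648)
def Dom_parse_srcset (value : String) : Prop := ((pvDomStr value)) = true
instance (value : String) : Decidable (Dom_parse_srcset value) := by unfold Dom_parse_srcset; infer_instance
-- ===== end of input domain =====

-- B is a one-pass character state machine instead of A's split-on-comma + strip + split; same results, same cost.

-- ===== PORT A =====
-- per-segment body of A's loop: part = part.strip(); if not part: continue; url = part.split()[0]; if url: out.append(url)
def pvSegA (out : List (List Char)) (part : List Char) : List (List Char) :=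
  let part := PySem.Chars.strip part
  if part.isEmpty then out
  else
    match PySem.List.pyGet? (PySem.Chars.split₀ part) 0 with
    | none => out   -- unreachable: split() of a nonempty stripped string is nonempty (Python would raise IndexError)
    | some url => if url.isEmpty then out else out ++ [url]

def parse_srcset (value : String) : List String :=
  ((PySem.Chars.splitOn value.toList [',']).foldl pvSegA []).map String.mk

-- ===== PORT B =====
-- one step of B's loop over the characters; state = (out, token, taken)
def pvStepB (st : List (List Char) × List Char × Bool) (c : Char) : List (List Char) × List Char × Bool :=
  let (out, token, taken) := st
  if c = ',' then
    (if token.isEmpty || taken then out else out ++ [token], [], false)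
  else if PySem.Chars.isspace c then
    (if token.isEmpty then (out, token, taken)
     else if taken then (out, [], taken)
     else (out ++ [token], [], true))
  else (out, token ++ [c], taken)

-- trailing flush of Source B: if token and not taken: out.append(''.join(token))
def pvFlush (st : List (List Char) × List Char × Bool) : List (List Char) :=
  let (out, token, taken) := st
  if token.isEmpty || taken then out else out ++ [token]

def parse_srcset_alt (value : String) : List String :=
  (pvFlush (value.toList.foldl pvStepB ([], [], false))).map String.mk

-- ===== PRECONDITION & SPEC =====
def Spec_parse_srcset (value : String) (out : List String) : Prop := out = parse_srcset_alt value
instance (value : String) (out : List String) : Decidable (Spec_parse_srcset value out) := by unfold Spec_parse_srcset; infer_instance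

-- ===== CLAIM (what is proved, stated in full; the proofs are below) =====
def Claim_equal_parse_srcset : Prop := ∀ (value : String), Dom_parse_srcset value → Spec_parse_srcset value (parse_srcset value)

-- ===== LEMMAS AND PROOFS =====

-- recursive characterisation of value.split(','): (first segment, remaining segments)
def pvSplit : List Char → List Char × List (List Char)
  | [] => ([], [])
  | c :: cs =>
    let r := pvSplit cs
    if c = ',' then ([], r.1 :: r.2) else (c :: r.1, r.2)

-- recursive characterisation of s.split() (accumulator form of PySem.Chars.split₀.go)
def pvWordsAux : List Char → List Char → List (List Char)
  | [], cur => if cur.isEmpty then [] else [cur.reverse]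
  | c :: rest, cur =>
    if PySem.Chars.isspace c then
      (if cur.isEmpty then pvWordsAux rest [] else cur.reverse :: pvWordsAux rest [])
    else pvWordsAux rest (c :: cur)

-- first whitespace-delimited token of a segment, as a (0/1-element) list
def pvFirstTok (seg : List Char) : List (List Char) :=
  match seg.dropWhile PySem.Chars.isspace with
  | [] => []
  | rest => [rest.takeWhile (fun c => !PySem.Chars.isspace c)]

-- B's state machine in direct recursive form
def pvF : Bool → List Char → List Char → List (List Char)
  | tak, tok, [] => if tok.isEmpty || tak then [] else [tok]
  | tak, tok, c :: cs =>
    if c = ',' then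
      (if tok.isEmpty || tak then pvF false [] cs else tok :: pvF false [] cs)
    else if PySem.Chars.isspace c then
      (if tok.isEmpty then pvF tak tok cs
       else if tak then pvF tak [] cs
       else tok :: pvF true [] cs)
    else pvF tak (tok ++ [c]) cs

-- tokens the current (partial) segment will contribute
def pvEmit (tak : Bool) (tok seg : List Char) : List (List Char) :=
  if tak then []
  else if tok.isEmpty then pvFirstTok seg
  else [tok ++ seg.takeWhile (fun c => !PySem.Chars.isspace c)]

theorem pvSplitOn_go_spec (l : List Char) : ∀ (fuel : Nat) (cur : List Char) (acc : List (List Char)),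
    l.length + 1 ≤ fuel →
    PySem.Chars.splitOn.go [','] fuel l cur acc = acc.reverse ++ (cur.reverse ++ (pvSplit l).1) :: (pvSplit l).2 := by
  induction l with
  | nil =>
    intro fuel cur acc h
    match fuel, h with
    | fuel + 1, _ => simp [PySem.Chars.splitOn.go, pvSplit]
  | cons c rest ih =>
    intro fuel cur acc h
    match fuel, h with
    | fuel + 1, h =>
      by_cases hc : c = ','
      · subst hc
        have hpre : List.isPrefixOf [','] (',' :: rest) = true := by simp [List.isPrefixOf]
        rw [PySem.Chars.splitOn.go, if_pos hpre]
        simp only [List.length_singleton, List.drop_succ_cons, List.drop_zero]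
        rw [ih fuel [] (cur.reverse :: acc) (by simpa using h)]
        simp [pvSplit]
      · have hcc : ¬ (',' = c) := fun h => hc h.symm
        rw [PySem.Chars.splitOn.go, if_neg (by simp [List.isPrefixOf, hcc])]
        rw [ih fuel (c :: cur) acc (by simpa using Nat.le_of_succ_le_succ h)]
        simp [pvSplit, hc]

theorem pvSplitOn_comma (l : List Char) :
    PySem.Chars.splitOn l [','] = (pvSplit l).1 :: (pvSplit l).2 := by
  rw [PySem.Chars.splitOn, pvSplitOn_go_spec l (l.length + 1) [] [] (le_refl _)]
  simp

theorem pvSplit₀_go_spec (l : List Char) : ∀ (cur : List Char) (acc : List (List Char)),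
    PySem.Chars.split₀.go l cur acc = acc.reverse ++ pvWordsAux l cur := by
  induction l with
  | nil => intro cur acc; by_cases h : cur.isEmpty <;> simp [PySem.Chars.split₀.go, pvWordsAux, h]
  | cons c rest ih =>
    intro cur acc
    by_cases hc : PySem.Chars.isspace c
    · by_cases hcur : cur.isEmpty <;>
        simp [PySem.Chars.split₀.go, pvWordsAux, hc, hcur, ih]
    · simp [PySem.Chars.split₀.go, pvWordsAux, hc, ih]

theorem pvSplit₀_eq (l : List Char) : PySem.Chars.split₀ l = pvWordsAux l [] := by
  rw [PySem.Chars.split₀, pvSplit₀_go_spec]; simp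

theorem pvWordsAux_cons (l : List Char) : ∀ (cur : List Char), cur ≠ [] →
    ∃ t, pvWordsAux l cur = (cur.reverse ++ l.takeWhile (fun c => !PySem.Chars.isspace c)) :: t := by
  induction l with
  | nil => intro cur h; exact ⟨[], by simp [pvWordsAux, h]⟩
  | cons c rest ih =>
    intro cur h
    by_cases hc : PySem.Chars.isspace c
    · exact ⟨pvWordsAux rest [], by simp [pvWordsAux, hc, h]⟩
    · obtain ⟨t, ht⟩ := ih (c :: cur) (by simp)
      exact ⟨t, by simp [pvWordsAux, hc, ht]⟩

-- every list is its rstrip plus an all-whitespace tail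
theorem pvRstrip_decomp (l : List Char) :
    ∃ t, l = PySem.Chars.rstrip l ++ t ∧ ∀ c ∈ t, PySem.Chars.isspace c = true := by
  refine ⟨(l.reverse.takeWhile PySem.Chars.isspace).reverse, ?_, ?_⟩
  · rw [PySem.Chars.rstrip]
    rw [← List.reverse_append, List.takeWhile_append_dropWhile, List.reverse_reverse]
  · intro c hc
    rw [List.mem_reverse] at hc
    exact List.mem_takeWhile_imp hc

theorem pvTakeWhile_append_ws (u t : List Char) (ht : ∀ c ∈ t, PySem.Chars.isspace c = true) :
    (u ++ t).takeWhile (fun c => !PySem.Chars.isspace c) = u.takeWhile (fun c => !PySem.Chars.isspace c) := by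
  induction u with
  | nil =>
    cases t with
    | nil => simp
    | cons c t' => simp [ht c (by simp)]
  | cons a u' ih =>
    by_cases ha : PySem.Chars.isspace a <;> simp [ha, ih]

-- head of dropWhile fails the predicate
theorem pvHead_dropWhile (p : Char → Bool) (l : List Char) (a : Char) (as : List Char)
    (h : l.dropWhile p = a :: as) : p a = false := by
  have h2 := List.head_dropWhile_not p (l := l) (by simp [h] : l.dropWhile p ≠ [])
  simp only [h, List.head_cons] at h2
  simpa using h2

theorem pvSegA_eq (part : List Char) (outs : List (List Char)) :
    pvSegA outs part = outs ++ pvFirstTok part := by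
  unfold pvSegA pvFirstTok
  cases hd : part.dropWhile PySem.Chars.isspace with
  | nil =>
    have hs : PySem.Chars.strip part = [] := by
      rw [PySem.Chars.strip, PySem.Chars.lstrip, hd]
      simp [PySem.Chars.rstrip]
    simp [hs]
  | cons c rest =>
    have hc : PySem.Chars.isspace c = false := pvHead_dropWhile _ part c rest hd
    obtain ⟨t, hdec, hws⟩ := pvRstrip_decomp (c :: rest)
    have hsp : PySem.Chars.strip part = PySem.Chars.rstrip (c :: rest) := by
      rw [PySem.Chars.strip, PySem.Chars.lstrip, hd]
    cases hr : PySem.Chars.rstrip (c :: rest) with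
    | nil =>
      exfalso
      rw [hr] at hdec
      simp only [List.nil_append] at hdec
      have : PySem.Chars.isspace c = true := hws c (by rw [← hdec]; simp)
      simp [hc] at this
    | cons c' u =>
      rw [hr] at hdec
      obtain ⟨hca, hrest⟩ : c = c' ∧ rest = u ++ t := by simpa using hdec
      subst hca
      have hsplit : PySem.Chars.split₀ (c :: u) = pvWordsAux u [c] := by
        rw [pvSplit₀_eq]
        simp [pvWordsAux, hc]
      obtain ⟨t', ht'⟩ := pvWordsAux_cons u [c] (by simp)
      have htw : u.takeWhile (fun c => !PySem.Chars.isspace c)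
          = rest.takeWhile (fun c => !PySem.Chars.isspace c) := by
        rw [hrest, pvTakeWhile_append_ws u t hws]
      rw [hsp, hr]
      dsimp only
      rw [hsplit, ht']
      simp [PySem.List.pyGet?, PySem.List.pyIdx?, htw, hc]

theorem pvFoldlB (cs : List Char) : ∀ (outs : List (List Char)) (tok : List Char) (tak : Bool),
    pvFlush (cs.foldl pvStepB (outs, tok, tak)) = outs ++ pvF tak tok cs := by
  induction cs with
  | nil => intro outs tok tak; by_cases h1 : tok.isEmpty <;> by_cases h2 : tak <;> simp [pvFlush, pvF, h1, h2]
  | cons c cs ih =>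
    intro outs tok tak
    rw [List.foldl_cons]
    by_cases hc : c = ','
    · by_cases h1 : tok.isEmpty <;> by_cases h2 : tak <;>
        simp [pvStepB, pvF, hc, h1, h2, ih]
    · by_cases hs : PySem.Chars.isspace c
      · by_cases h1 : tok.isEmpty <;> by_cases h2 : tak <;>
          simp [pvStepB, pvF, hc, hs, h1, h2, ih]
      · simp [pvStepB, pvF, hc, hs, ih]

theorem pvF_spec (cs : List Char) : ∀ (tok : List Char) (tak : Bool),
    pvF tak tok cs = pvEmit tak tok (pvSplit cs).1 ++ ((pvSplit cs).2).flatMap pvFirstTok := by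
  induction cs with
  | nil =>
    intro tok tak
    by_cases h1 : tok.isEmpty <;> by_cases h2 : tak <;>
      simp_all [pvF, pvEmit, pvFirstTok, pvSplit]
  | cons c cs ih =>
    intro tok tak
    by_cases hc : c = ','
    · subst hc
      by_cases h1 : tok.isEmpty <;> by_cases h2 : tak <;>
        simp_all [pvF, pvEmit, pvSplit, pvFirstTok]
    · by_cases hs : PySem.Chars.isspace c
      · by_cases h1 : tok.isEmpty <;> by_cases h2 : tak <;>
          simp_all [pvF, pvEmit, pvSplit, pvFirstTok]
      · by_cases h1 : tok.isEmpty <;> by_cases h2 : tak <;>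
          simp_all [pvF, pvEmit, pvSplit, pvFirstTok]

theorem pvFoldlA (segs : List (List Char)) : ∀ (outs : List (List Char)),
    segs.foldl pvSegA outs = outs ++ segs.flatMap pvFirstTok := by
  induction segs with
  | nil => simp
  | cons s segs ih => intro outs; rw [List.foldl_cons, ih, pvSegA_eq s]; simp

-- ===== VERDICT (by name: the statement is the Claim_ definition above) =====
theorem parse_srcset_spec : Claim_equal_parse_srcset := by
  intro value _
  unfold Spec_parse_srcset parse_srcset parse_srcset_alt
  rw [pvSplitOn_comma, pvFoldlA, pvFoldlB, pvF_spec]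
  simp [pvEmit]
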